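-- pv_equiv track=rewrite | github.com/mosaicml/streaming | benchmarks/backends/generate.py | _splits_by_size
-- ===== SOURCE A (Python) =====
-- from collections import defaultdict
-- from typing import Dict, Iterable, List, Optional, Tuple, TypeVar
--
-- def _splits_by_size(dataset: Dict[str, Tuple[List[int], List[str]]]) -> Iterable[str]:
--     """Order a dataset's splits by their size in samples, then by name.
--
--     Argxs:
--         dataset (Dict[str, Tuple[List[int], List[str]]]): Mapping of split name to split data.
--
--     Returns:
--         Iterable[str]: Ordered split names.
--     """
--     size2splits = defaultdict(list)
--     for split, (nums, _) in dataset.items():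
--         size2splits[len(nums)].append(split)
--
--     splits_by_size = []
--     for size in sorted(size2splits):
--         for split in sorted(size2splits[size]):
--             splits_by_size.append(split)
--
--     return splits_by_size
-- ===== SOURCE B (Python) =====
-- def _splits_by_size(dataset):
--     """Order a dataset's splits by their size in samples, then by name."""
--     return sorted(dataset, key=lambda s: (len(dataset[s][0]), s))
-- ===== Notes on version B (the rewrite author's own statement) =====
-- stated objective: simpler
-- what changed: B drops A's size->names grouping dict and its nested sorted-sizes/sorted-bucket loops, returning one flat sort of the split names by the composite key (sample count, name).
import Mathlib
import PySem

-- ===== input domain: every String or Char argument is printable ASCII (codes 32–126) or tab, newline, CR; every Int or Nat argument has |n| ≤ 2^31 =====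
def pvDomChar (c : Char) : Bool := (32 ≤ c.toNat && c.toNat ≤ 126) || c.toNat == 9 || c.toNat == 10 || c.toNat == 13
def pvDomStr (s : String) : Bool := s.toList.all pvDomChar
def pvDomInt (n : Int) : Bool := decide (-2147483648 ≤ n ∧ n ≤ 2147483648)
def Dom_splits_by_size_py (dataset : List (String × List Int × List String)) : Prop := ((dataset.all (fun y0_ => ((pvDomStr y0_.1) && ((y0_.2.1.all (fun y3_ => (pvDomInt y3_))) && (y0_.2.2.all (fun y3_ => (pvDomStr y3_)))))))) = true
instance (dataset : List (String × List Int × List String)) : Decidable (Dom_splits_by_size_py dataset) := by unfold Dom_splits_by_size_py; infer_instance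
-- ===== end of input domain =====

-- B replaces A's size->names grouping dict and nested bucket loops by one flat composite-key sort (simpler).


-- ===== PORT A =====
def splits_by_size_py (dataset : List (String × List Int × List String)) : List String :=
  let size2splits :=
    dataset.foldl (fun d p => d.modify p.2.1.length [] (fun v => v ++ [p.1])) PySem.Dict.empty
  (PySem.List.sorted size2splits.keys (fun x => x)).foldl
    (fun acc size =>
      (PySem.List.sorted (size2splits.getD size []) (fun x => x)).foldl
        (fun a split => a ++ [split]) acc)
    []

-- ===== PORT B =====
-- dataset[s] is a dict lookup: first matching key of the association list (exact for a Python dict, whose keys are unique).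
def splits_by_size_py_alt (dataset : List (String × List Int × List String)) : List String :=
  PySem.List.sorted2 (dataset.map (fun p => p.1))
    (fun s => ((dataset.find? (fun p => p.1 == s)).map (fun p => p.2.1.length)).getD 0)
    (fun s => s)

-- ===== PRECONDITION & SPEC =====
-- A's Python argument is a dict, whose keys are necessarily distinct; Pre_ excludes only association
-- lists with duplicate split names, which do not encode any Python dict input.
def Pre_splits_by_size_py (dataset : List (String × List Int × List String)) : Prop :=
  (dataset.map (fun p => p.1)).Nodup
instance (dataset : List (String × List Int × List String)) : Decidable (Pre_splits_by_size_py dataset) := by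
  unfold Pre_splits_by_size_py; infer_instance
def pvWitness_splits_by_size_py : (List (String × List Int × List String)) :=
  [("train", ([1, 2, 3], ["a"])), ("val", ([4], ["b"])), ("test", ([5], []))]
def Spec_splits_by_size_py (dataset : List (String × List Int × List String)) (out : List String) : Prop := out = splits_by_size_py_alt dataset
instance (dataset : List (String × List Int × List String)) (out : List String) : Decidable (Spec_splits_by_size_py dataset out) := by unfold Spec_splits_by_size_py; infer_instance

-- ===== CLAIM (what is proved, stated in full; the proofs are below) =====
def Claim_equal_splits_by_size_py : Prop := ∀ (dataset : List (String × List Int × List String)), Dom_splits_by_size_py dataset → Pre_splits_by_size_py dataset → Spec_splits_by_size_py dataset (splits_by_size_py dataset)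

-- ===== LEMMAS AND PROOFS =====

-- sorted2 with keys k1, k2 is sorted with the lexicographic pair key.
theorem pv_sorted2_eq_sorted_lex {α κ₁ κ₂ : Type} [LinearOrder κ₁] [LinearOrder κ₂]
    (xs : List α) (k1 : α → κ₁) (k2 : α → κ₂) :
    PySem.List.sorted2 xs k1 k2 = PySem.List.sorted xs (fun x => toLex (k1 x, k2 x)) := by
  unfold PySem.List.sorted2 PySem.List.sorted
  simp only [if_neg (by decide : ¬ (false = true))]
  have hb : (fun a b => decide (k1 a < k1 b) || (!decide (k1 b < k1 a) && decide (k2 a < k2 b)))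
      = (fun a b => decide ((toLex (k1 a, k2 a) : Lex (κ₁ × κ₂)) < toLex (k1 b, k2 b))) := by
    funext a b
    rcases lt_trichotomy (k1 a) (k1 b) with h | h | h
    · simp [h, Prod.Lex.lt_iff]
    · simp [h, Prod.Lex.lt_iff]
    · simp [h, not_lt_of_gt h, Prod.Lex.lt_iff, ne_of_gt h]
  rw [hb]

-- the size of a split name, as B computes it (first match in the association list)
def pvSz (dataset : List (String × List Int × List String)) (s : String) : Nat :=
  ((dataset.find? (fun p => p.1 == s)).map (fun p => p.2.1.length)).getD 0

theorem pv_sz_of_mem {dataset : List (String × List Int × List String)}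
    (hnd : (dataset.map (fun p => p.1)).Nodup)
    {p : String × List Int × List String} (hp : p ∈ dataset) :
    pvSz dataset p.1 = p.2.1.length := by
  induction dataset with
  | nil => cases hp
  | cons q rest ih =>
    simp only [List.map_cons, List.nodup_cons, List.mem_map] at hnd
    rcases List.mem_cons.mp hp with rfl | hp'
    · simp [pvSz, List.find?]
    · have hne : q.1 ≠ p.1 := fun h => hnd.1 ⟨p, hp', h.symm⟩
      have : pvSz rest p.1 = p.2.1.length := ih hnd.2 hp'
      simpa [pvSz, List.find?_cons, beq_iff_eq, hne] using this

-- the bucket of split names whose sample count is c, in dataset order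
def pvBucket (dataset : List (String × List Int × List String)) (c : Nat) : List String :=
  ((dataset.map (fun p => (p.2.1.length, p.1))).filter (fun q => q.1 == c)).map (fun q => q.2)

theorem pv_mem_bucket {dataset : List (String × List Int × List String)} {c : Nat} {x : String} :
    x ∈ pvBucket dataset c ↔ ∃ p ∈ dataset, p.1 = x ∧ p.2.1.length = c := by
  simp only [pvBucket, List.mem_map, List.mem_filter, beq_iff_eq]
  constructor
  · rintro ⟨q, ⟨⟨p, hp, rfl⟩, hc⟩, rfl⟩
    exact ⟨p, hp, rfl, hc⟩
  · rintro ⟨p, hp, rfl, hc⟩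
    exact ⟨(p.2.1.length, p.1), ⟨⟨p, hp, rfl⟩, hc⟩, rfl⟩

theorem pv_bucket_sublist (dataset : List (String × List Int × List String)) (c : Nat) :
    (pvBucket dataset c).Sublist (dataset.map (fun p => p.1)) := by
  have h := (List.filter_sublist (l := dataset.map (fun p => (p.2.1.length, p.1)))
      (p := fun q => q.1 == c)).map (f := fun q => q.2)
  simpa [List.map_map, Function.comp] using h

theorem pv_sz_bucket {dataset : List (String × List Int × List String)}
    (hnd : (dataset.map (fun p => p.1)).Nodup) {c : Nat} {x : String}
    (hx : x ∈ pvBucket dataset c) : pvSz dataset x = c := by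
  rcases pv_mem_bucket.mp hx with ⟨p, hp, rfl, hc⟩
  rw [pv_sz_of_mem hnd hp, hc]

-- ===== VERDICT =====
theorem splits_by_size_py_spec : Claim_equal_splits_by_size_py := by
  intro dataset _hdom hnd
  unfold Pre_splits_by_size_py at hnd
  unfold Spec_splits_by_size_py
  -- notation
  set keys := dataset.map (fun p => p.1) with hkeys
  set sizes := dataset.map (fun p => p.2.1.length) with hsizes
  set S := PySem.List.sorted (PySem.Set.ofList sizes) (fun x => x) with hS
  set ys := S.flatMap (fun c => PySem.List.sorted (pvBucket dataset c) (fun x => x)) with hys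
  -- Step 1: A computes ys
  have hA : splits_by_size_py dataset = ys := by
    unfold splits_by_size_py
    have hd : dataset.foldl (fun d p => d.modify p.2.1.length [] (fun v => v ++ [p.1])) PySem.Dict.empty
        = (dataset.map (fun p => (p.2.1.length, p.1))).foldl
            (fun d q => d.modify q.1 [] (fun v => v ++ [q.2])) PySem.Dict.empty := by
      rw [List.foldl_map]
    have hkeysd : (dataset.foldl (fun d p => d.modify p.2.1.length [] (fun v => v ++ [p.1]))
        PySem.Dict.empty).keys = PySem.Set.ofList sizes := by
      rw [PySem.Dict.keys_foldl_modify_key dataset (fun p => p.2.1.length) []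
        (fun _ p => fun v => v ++ [p.1]) PySem.Dict.empty]
      simp [PySem.Set.update_nil_left, PySem.Dict.keys_empty]
      rw [hsizes]
    have hgetd : ∀ c, (dataset.foldl (fun d p => d.modify p.2.1.length [] (fun v => v ++ [p.1]))
        PySem.Dict.empty).getD c [] = pvBucket dataset c := by
      intro c
      rw [hd, PySem.Dict.getD_foldl_modify_append]
      simp [pvBucket, PySem.Dict.getD_empty]
    simp only [hkeysd, hgetd]
    have hinner : (fun (acc : List String) (size : Nat) =>
        (PySem.List.sorted (pvBucket dataset size) (fun x => x)).foldl
          (fun a split => a ++ [split]) acc)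
        = fun acc size => acc ++ PySem.List.sorted (pvBucket dataset size) (fun x => x) := by
      funext acc size
      exact PySem.List.foldl_append_singleton_eq_self _ _
    rw [hinner, PySem.List.foldl_append_eq_flatMap]
    simp [hys, hS, hsizes]
  -- Step 2: properties of ys
  have hSlt : List.Pairwise (fun a b => a < b) S := PySem.List.sorted_ofList_pairwise_lt sizes
  have hpw : List.Pairwise
      (fun a b => (toLex (pvSz dataset a, a) : Lex (Nat × String)) < toLex (pvSz dataset b, b)) ys := by
    rw [hys, List.pairwise_flatMap]
    constructor
    · intro c _
      have hnodup : (PySem.List.sorted (pvBucket dataset c) (fun x => x)).Nodup :=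
        ((PySem.List.sorted_perm _ _ _).symm).nodup ((pv_bucket_sublist dataset c).nodup hnd)
      have hle : List.Pairwise (fun a b => a ≤ b)
          (PySem.List.sorted (pvBucket dataset c) (fun x => x)) :=
        PySem.List.sorted_pairwise _ _
      have hlt : List.Pairwise (fun a b : String => a < b)
          (PySem.List.sorted (pvBucket dataset c) (fun x => x)) :=
        (hle.and hnodup).imp (fun h => lt_of_le_of_ne h.1 h.2)
      refine hlt.imp_of_mem ?_
      intro a b ha hb hab
      have hsa : pvSz dataset a = c :=
        pv_sz_bucket hnd ((PySem.List.mem_sorted _ _ _ _).mp ha)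
      have hsb : pvSz dataset b = c :=
        pv_sz_bucket hnd ((PySem.List.mem_sorted _ _ _ _).mp hb)
      rw [Prod.Lex.lt_iff]
      exact Or.inr ⟨by simp [hsa, hsb], hab⟩
    · refine hSlt.imp ?_
      intro c c' hcc x hx y hy
      have hsx : pvSz dataset x = c :=
        pv_sz_bucket hnd ((PySem.List.mem_sorted _ _ _ _).mp hx)
      have hsy : pvSz dataset y = c' :=
        pv_sz_bucket hnd ((PySem.List.mem_sorted _ _ _ _).mp hy)
      rw [Prod.Lex.lt_iff]
      exact Or.inl (by simp [hsx, hsy, hcc])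
  have hysnd : ys.Nodup := by
    refine hpw.imp ?_
    intro a b h
    rintro rfl
    exact lt_irrefl _ h
  have hmem : ∀ x, x ∈ ys ↔ x ∈ keys := by
    intro x
    rw [hys]
    simp only [List.mem_flatMap, PySem.List.mem_sorted, hS, PySem.Set.mem_ofList]
    constructor
    · rintro ⟨c, _, hx⟩
      rcases pv_mem_bucket.mp hx with ⟨p, hp, rfl, _⟩
      exact List.mem_map.mpr ⟨p, hp, rfl⟩
    · intro hx
      rcases List.mem_map.mp hx with ⟨p, hp, rfl⟩
      exact ⟨p.2.1.length, List.mem_map.mpr ⟨p, hp, rfl⟩,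
        pv_mem_bucket.mpr ⟨p, hp, rfl, rfl⟩⟩
  have hperm : ys.Perm keys := (List.perm_ext_iff_of_nodup hysnd hnd).mpr hmem
  -- Step 3: B computes ys as well
  have hB : splits_by_size_py_alt dataset = ys := by
    unfold splits_by_size_py_alt
    have : PySem.List.sorted2 keys (fun s => pvSz dataset s) (fun s => s) = ys := by
      rw [pv_sorted2_eq_sorted_lex]
      exact PySem.List.sorted_eq_of_perm_of_pairwise_lt keys ys _ hperm hpw
    exact this
  rw [hA, hB]
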